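-- pv_equiv track=rewrite | github.com/yuramayer/python-tasks | 11/code.py | complete_tasks
-- ===== SOURCE A (Python) =====
-- def complete_tasks(tasks, N):
--
--     # сортируем tasks
--     tasks_sorted = sorted(tasks, key=lambda x: x[2])
--
--     # создаём календарь воркеров:
--     #  для каждго воркера храним момент времени,
--     #  когда они освободились. В начале свободны
--     workers_finish_time = {i: 0 for i in range(N)}
--
--     # проходим по нашим таскам
--     for task_name, dur, delay_max in tasks_sorted:
--
--         # переменные под поиск свободного воркера
--         #  - min_value = лучшее время освобождения
--         min_value = float('inf')
--         #  - early_worker_idx = индекс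
--         #    лучшего кандидата
--         early_worker_idx = N + 1
--
--         # проходимся по воркерам, ищем свободного
--         for key, value in workers_finish_time.items():
--
--             # если воркер освобождается
--             #  раньше текущего лучшего -
--             #  обновляю лучшего
--             if value < min_value:
--                 # фиксируем нового
--                 #  самого раннего воркера
--                 min_value = value
--                 early_worker_idx = key
--
--         # стартуем на самом раннем как можно раньше
--         start_time = workers_finish_time[early_worker_idx]
--
--         # если самый ранний воркер
--         #  освобождается слишком поздно,
--         #  то start_time > delay_max
--         #  и возвращаем False
--         if start_time > delay_max:
--             return False
--
--         # назначаем задачу раннему воркеру: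
--         #  теперь он будет занят до + duration
--         workers_finish_time[early_worker_idx] = start_time + dur
--
--     return True
-- ===== SOURCE B (Python) =====
-- def complete_tasks(tasks, N):
--     # Pool of worker free-times kept as a sorted list: the earliest-free worker is
--     # always at the front, and the new finish time is re-inserted at a position
--     # found by binary search, so no scan over all N workers is needed per task.
--     free = [0] * N
--     for _name, dur, deadline in sorted(tasks, key=lambda t: t[2]):
--         start = free.pop(0)
--         if start > deadline:
--             return False
--         f = start + dur
--         lo, hi = 0, len(free)
--         while lo < hi:
--             mid = (lo + hi) // 2
--             if free[mid] < f:
--                 lo = mid + 1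
--             else:
--                 hi = mid
--         free.insert(lo, f)
--     return True
-- ===== Notes on version B (the rewrite author's own statement) =====
-- stated objective: faster
-- what changed: Replaces A's per-task Python-level scan over an N-entry worker dict with a sorted pool of free-times: the earliest worker is popped from the front and the new finish time re-inserted at a position found by binary search.
import Mathlib
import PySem

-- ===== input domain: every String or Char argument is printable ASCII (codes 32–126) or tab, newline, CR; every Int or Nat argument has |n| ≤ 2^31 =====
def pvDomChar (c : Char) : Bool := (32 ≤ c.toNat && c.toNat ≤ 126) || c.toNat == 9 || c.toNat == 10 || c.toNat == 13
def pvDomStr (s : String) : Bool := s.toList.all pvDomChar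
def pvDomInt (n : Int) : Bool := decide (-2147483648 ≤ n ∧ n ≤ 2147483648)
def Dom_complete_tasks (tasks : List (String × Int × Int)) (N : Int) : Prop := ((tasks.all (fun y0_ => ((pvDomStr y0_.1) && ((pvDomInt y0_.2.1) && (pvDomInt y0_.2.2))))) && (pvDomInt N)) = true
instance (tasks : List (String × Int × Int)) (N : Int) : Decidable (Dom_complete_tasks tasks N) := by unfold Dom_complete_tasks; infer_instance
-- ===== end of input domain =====

-- B replaces A's per-task linear scan over the N-worker dict by a sorted pool of
-- free-times (pop the front = earliest worker, re-insert the new finish time in order).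


-- ===== PORT A =====
-- inner 'for key, value in workers_finish_time.items()' body: acc = (min_value, early_worker_idx),
-- min_value = none models the initial float('inf') (every int is < inf)
def pvAMin (acc : Option Int × Int) (kv : Int × Int) : Option Int × Int :=
  match acc.1 with
  | none => (some kv.2, kv.1)
  | some m => if kv.2 < m then (some kv.2, kv.1) else acc

-- the 'for task_name, dur, delay_max in tasks_sorted' loop
def pvALoop (N : Int) (d : PySem.Dict Int Int) : List (String × Int × Int) → Bool
  | [] => true
  | (_, dur, dmax) :: rest =>
    let r := d.items.foldl pvAMin (none, N + 1)
    -- start_time = workers_finish_time[early_worker_idx]; the KeyError case (empty dict, N ≤ 0)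
    -- is excluded by Pre_, .getD 0 totalizes it
    let start := (d.get? r.2).getD 0
    if start > dmax then false
    else pvALoop N (d.insert r.2 (start + dur)) rest

def complete_tasks (tasks : List (String × Int × Int)) (N : Int) : Bool :=
  let tasks_sorted := PySem.List.sorted tasks (fun x => x.2.2)
  let workers := (PySem.List.pyRange 0 N 1).foldl (fun d i => d.insert i (0 : Int)) PySem.Dict.empty
  pvALoop N workers tasks_sorted

-- ===== PORT B =====
-- the 'while lo < hi' binary search; free[mid] is always in range (lo ≤ mid < hi ≤ len),
-- so List.getD is exact for Python's free[mid]
def pvBSearch (free : List Int) (f : Int) (lo hi : Nat) : Nat :=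
  if lo < hi then
    let mid := (lo + hi) / 2
    if free.getD mid 0 < f then pvBSearch free f (mid + 1) hi
    else pvBSearch free f lo mid
  else lo
termination_by hi - lo
decreasing_by all_goals omega

-- find the position by binary search, then free.insert(lo, f)
def pvBInsort (free : List Int) (f : Int) : List Int :=
  PySem.List.insert free ((pvBSearch free f 0 free.length : Nat) : Int) f

-- the task loop: free.pop(0) (IndexError when free = [], i.e. N ≤ 0 — excluded by Pre_)
def pvBLoop (free : List Int) : List (String × Int × Int) → Bool
  | [] => true
  | (_, dur, dmax) :: rest =>
    match free with
    | [] => true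
    | s :: t => if s > dmax then false else pvBLoop (pvBInsort t (s + dur)) rest

def complete_tasks_alt (tasks : List (String × Int × Int)) (N : Int) : Bool :=
  pvBLoop (List.replicate N.toNat 0) (PySem.List.sorted tasks (fun x => x.2.2))

-- ===== PRECONDITION & SPEC =====
-- Pre_ excludes exactly the inputs where A raises: with no worker (N ≤ 0) and at least one
-- task, A's dict lookup raises KeyError (and B's pop from the empty pool raises IndexError).
def Pre_complete_tasks (tasks : List (String × Int × Int)) (N : Int) : Prop :=
  tasks = [] ∨ 1 ≤ N
instance (tasks : List (String × Int × Int)) (N : Int) : Decidable (Pre_complete_tasks tasks N) := by unfold Pre_complete_tasks; infer_instance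
def pvWitness_complete_tasks : (List (String × Int × Int)) × Int := ([("a", 1, 2), ("b", 2, 3)], 2)
def Spec_complete_tasks (tasks : List (String × Int × Int)) (N : Int) (out : Bool) : Prop := out = complete_tasks_alt tasks N
instance (tasks : List (String × Int × Int)) (N : Int) (out : Bool) : Decidable (Spec_complete_tasks tasks N out) := by unfold Spec_complete_tasks; infer_instance

-- ===== CLAIM (what is proved, stated in full; the proofs are below) =====
def Claim_equal_complete_tasks : Prop := ∀ (tasks : List (String × Int × Int)) (N : Int), Dom_complete_tasks tasks N → Pre_complete_tasks tasks N → Spec_complete_tasks tasks N (complete_tasks tasks N)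

-- ===== LEMMAS AND PROOFS =====

-- the inner min-scan: starting from a seen value m with key k, it returns a value/key pair
-- that is an entry of the list (or the start pair), whose value bounds m and every value
theorem pvAMin_fold_spec (ps : List (Int × Int)) (m k : Int) :
    ∃ M K, ps.foldl pvAMin (some m, k) = (some M, K) ∧
      ((K, M) = (k, m) ∨ (K, M) ∈ ps) ∧ M ≤ m ∧ ∀ p ∈ ps, M ≤ p.2 := by
  induction ps generalizing m k with
  | nil => exact ⟨m, k, rfl, Or.inl rfl, le_refl _, by simp⟩
  | cons e t ih =>
    simp only [List.foldl_cons, pvAMin]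
    by_cases h : e.2 < m
    · simp only [h, if_pos]
      obtain ⟨M, K, h1, h2, h3, h4⟩ := ih e.2 e.1
      refine ⟨M, K, h1, ?_, by omega, ?_⟩
      · rcases h2 with h2 | h2
        · right; rw [h2, Prod.mk.eta]; exact List.mem_cons_self
        · right; exact List.mem_cons_of_mem _ h2
      · intro p hp
        rcases List.mem_cons.mp hp with hp | hp
        · subst hp; omega
        · exact h4 p hp
    · simp only [h, if_false]
      obtain ⟨M, K, h1, h2, h3, h4⟩ := ih m k
      refine ⟨M, K, h1, ?_, h3, ?_⟩
      · rcases h2 with h2 | h2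
        · left; exact h2
        · right; exact List.mem_cons_of_mem _ h2
      · intro p hp
        rcases List.mem_cons.mp hp with hp | hp
        · subst hp; omega
        · exact h4 p hp

-- values of the in-place overwrite at a present key, up to permutation
theorem values_update_perm (ps : List (Int × Int)) (K M v : Int)
    (hnd : (ps.map Prod.fst).Nodup) (hmem : (K, M) ∈ ps) :
    ((ps.map (fun p => if p.1 == K then (K, v) else p)).map Prod.snd).Perm
      (v :: (ps.map Prod.snd).erase M) := by
  induction ps with
  | nil => simp at hmem
  | cons e t ih =>
    simp only [List.map_cons, List.nodup_cons] at hnd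
    obtain ⟨hK1, hK2⟩ := hnd
    by_cases he : e.1 = K
    · -- head is the overwritten entry; its value must be M, and K is not a key of t
      have heM : e.2 = M := by
        have hK1' : K ∉ t.map Prod.fst := he ▸ hK1
        rcases List.mem_cons.mp hmem with h | h
        · rw [← h]
        · exact absurd (List.mem_map.mpr ⟨(K, M), h, rfl⟩) hK1'
      have ht : t.map (fun p => if p.1 == K then (K, v) else p) = t := by
        conv_rhs => rw [← List.map_id t]
        apply List.map_congr_left
        intro p hp
        have hne : p.1 ≠ K := fun hc => (he ▸ hK1) (List.mem_map.mpr ⟨p, hp, hc⟩)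
        simp [hne]
      simp only [List.map_cons, he, beq_self_eq_true, if_pos, ht, heM, List.erase_cons_head]
      exact List.Perm.refl _
    · have hbe : (e.1 == K) = false := by simp [he]
      have hmem' : (K, M) ∈ t := by
        rcases List.mem_cons.mp hmem with h | h
        · exact absurd (congrArg Prod.fst h).symm he
        · exact h
      have hMt : M ∈ t.map Prod.snd := List.mem_map.mpr ⟨(K, M), hmem', rfl⟩
      simp only [List.map_cons, hbe]
      by_cases hv : e.2 = M
      · subst hv
        rw [List.erase_cons_head]
        exact ((ih hK2 hmem').cons e.2).trans
          ((List.Perm.swap v e.2 _).trans ((List.perm_cons_erase hMt).symm.cons v))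
      · rw [List.erase_cons_tail (by simpa using hv)]
        exact ((ih hK2 hmem').cons e.2).trans (List.Perm.swap v e.2 _)

-- the binary search returns the leftmost position whose element is not < f
theorem pvBSearch_spec (free : List Int) (f : Int) (lo hi : Nat)
    (hsort : free.Pairwise (· ≤ ·)) (hl : lo ≤ hi) (hh : hi ≤ free.length)
    (hlo : ∀ i, i < lo → free.getD i 0 < f)
    (hhi : ∀ i, hi ≤ i → i < free.length → ¬ free.getD i 0 < f) :
    pvBSearch free f lo hi ≤ free.length ∧
      (∀ i, i < pvBSearch free f lo hi → free.getD i 0 < f) ∧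
      (∀ i, pvBSearch free f lo hi ≤ i → i < free.length → ¬ free.getD i 0 < f) := by
  have hmono : ∀ i j : Nat, i ≤ j → j < free.length → free.getD i 0 ≤ free.getD j 0 := by
    intro i j hij hj
    rcases Nat.eq_or_lt_of_le hij with rfl | hij
    · exact le_refl _
    · rw [List.getD_eq_getElem _ _ (by omega), List.getD_eq_getElem _ _ hj]
      exact List.pairwise_iff_getElem.mp hsort i j (by omega) hj hij
  fun_induction pvBSearch free f lo hi with
  | case1 lo hi hlt mid hmid ih =>
    apply ih (by omega) hh
    · intro i hi'
      rcases Nat.lt_or_ge i mid with h | h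
      · exact lt_of_le_of_lt (hmono i mid (by omega) (by omega)) hmid
      · have : i = mid := by omega
        rw [this]; exact hmid
    · exact hhi
  | case2 lo hi hlt mid hmid ih =>
    apply ih (by omega) (by omega) hlo
    intro i hmi hi'
    exact fun hc => hmid (lt_of_le_of_lt (hmono mid i hmi hi') hc)
  | case3 lo hi hge =>
    refine ⟨by omega, fun i hi' => hlo i hi', fun i hli hi' => hhi i (by omega) hi'⟩

-- inserting at such a position is the ordered insertion
theorem insert_at_pos_eq_orderedInsert (free : List Int) (f : Int) (r : Nat)
    (hr : r ≤ free.length) (hlo : ∀ i, i < r → free.getD i 0 < f)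
    (hhi : ∀ i, r ≤ i → i < free.length → ¬ free.getD i 0 < f) :
    free.take r ++ f :: free.drop r = List.orderedInsert (· ≤ ·) f free := by
  induction free generalizing r with
  | nil =>
    have : r = 0 := by simpa using hr
    subst this; rfl
  | cons x t ih =>
    cases r with
    | zero =>
      have : ¬ x < f := by simpa using hhi 0 (Nat.zero_le _) (by simp)
      simp [List.orderedInsert, show f ≤ x by omega]
    | succ r' =>
      have hx : x < f := by simpa using hlo 0 (Nat.succ_pos _)
      have : ¬ f ≤ x := by omega
      simp only [List.orderedInsert, this, if_false, List.take_succ_cons,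
        List.drop_succ_cons, List.cons_append]
      rw [ih r' (by simpa using hr)
        (fun i hi' => by simpa using hlo (i + 1) (by omega))
        (fun i hli hi' => by simpa using hhi (i + 1) (by omega) (by simpa using hi'))]

-- B's binary-search insert is the ordered insertion (on a sorted pool)
theorem pvBInsort_eq_orderedInsert (free : List Int) (f : Int)
    (hsort : free.Pairwise (· ≤ ·)) :
    pvBInsort free f = List.orderedInsert (· ≤ ·) f free := by
  obtain ⟨h1, h2, h3⟩ := pvBSearch_spec free f 0 free.length hsort (Nat.zero_le _)
    (le_refl _) (fun i hi' => absurd hi' (Nat.not_lt_zero i)) (fun i hli hi' => by omega)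
  rw [pvBInsort, PySem.List.insert_natCast _ _ _ h1]
  exact insert_at_pos_eq_orderedInsert free f _ h1 h2 h3

-- main loop invariant: dict keys distinct, pool = multiset of dict values, pool sorted, nonempty
theorem loop_equiv (ts : List (String × Int × Int)) (N : Int) (d : PySem.Dict Int Int)
    (l : List Int) (hnd : d.keys.Nodup) (hne : d.values ≠ [])
    (hperm : d.values.Perm l) (hsort : l.Pairwise (· ≤ ·)) :
    pvALoop N d ts = pvBLoop l ts := by
  induction ts generalizing d l with
  | nil => cases l <;> rfl
  | cons task rest ih =>
    obtain ⟨_, dur, dmax⟩ := task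
    -- the pool is nonempty
    have hlne : l ≠ [] := fun h => hne ((h ▸ hperm).eq_nil)
    obtain ⟨s, t, rfl⟩ := List.exists_cons_of_ne_nil hlne
    -- the dict items are nonempty
    have hine : d.items ≠ [] := fun h => hne (by simp [PySem.Dict.values, h])
    obtain ⟨e, ps, hitems⟩ := List.exists_cons_of_ne_nil hine
    -- run the min-scan
    obtain ⟨M, K, hfold, hmem, hMe, hbound⟩ := pvAMin_fold_spec ps e.2 e.1
    have hfold' : d.items.foldl pvAMin (none, N + 1) = (some M, K) := by
      rw [hitems, List.foldl_cons]
      exact hfold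
    have hKM : (K, M) ∈ d.items := by
      rw [hitems]
      rcases hmem with h | h
      · rw [h, Prod.mk.eta]; exact List.mem_cons_self
      · exact List.mem_cons_of_mem _ h
    have hget : d.get? K = some M := PySem.Dict.get?_of_mem_items d hKM hnd
    -- M is the minimum of the values, s the head of the sorted pool: they are equal
    have hMv : M ∈ d.values := List.mem_map.mpr ⟨(K, M), hKM, rfl⟩
    have hMmin : ∀ w ∈ d.values, M ≤ w := by
      intro w hw
      obtain ⟨p, hp, rfl⟩ := List.mem_map.mp hw
      rw [hitems] at hp
      rcases List.mem_cons.mp hp with h | h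
      · subst h; exact hMe
      · exact hbound p h
    have hMs : M = s := by
      have h1 : M ∈ s :: t := hperm.mem_iff.mp hMv
      have h2 : s ∈ d.values := hperm.mem_iff.mpr List.mem_cons_self
      have h3 : ∀ y ∈ t, s ≤ y := fun y hy => List.rel_of_pairwise_cons hsort hy
      rcases List.mem_cons.mp h1 with h | h
      · exact h
      · exact le_antisymm (hMmin s h2) (h3 M h)
    subst hMs
    have hcont : d.contains K = true :=
      (PySem.Dict.contains_iff_mem_keys d K).mpr (PySem.Dict.mem_keys_of_mem_items _ hKM)
    -- both loops test the same condition on the same minimum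
    simp only [pvALoop, pvBLoop, hfold', hget, Option.getD_some]
    by_cases hc : M > dmax
    · rw [if_pos hc, if_pos hc]
    · rw [if_neg hc, if_neg hc]
      -- recurse with the updated state
      have hupd : (d.insert K (M + dur)).values.Perm ((M + dur) :: (d.values.erase M)) := by
        show ((d.insert K (M + dur)).items.map Prod.snd).Perm _
        rw [PySem.Dict.items_insert_of_contains d (M + dur) hcont]
        exact values_update_perm d.items K M (M + dur) hnd hKM
      apply ih
      · exact PySem.Dict.nodup_keys_insert d K (M + dur) hnd
      · intro hnil
        have := (hnil ▸ hupd).symm.eq_nil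
        simp at this
      · rw [pvBInsort_eq_orderedInsert _ _ (List.Pairwise.of_cons hsort)]
        have h2 : (d.values.erase M).Perm ((M :: t).erase M) := hperm.erase M
        rw [List.erase_cons_head] at h2
        exact (hupd.trans (h2.cons _)).trans (List.perm_orderedInsert _ _ _).symm
      · rw [pvBInsort_eq_orderedInsert _ _ (List.Pairwise.of_cons hsort)]
        exact List.Pairwise.orderedInsert _ _ (List.Pairwise.of_cons hsort)

-- initial dict: items are (i, 0) for i in range(N)
theorem init_items (N : Int) :
    ((PySem.List.pyRange 0 N 1).foldl (fun d i => d.insert i (0 : Int))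
      PySem.Dict.empty).items = (PySem.List.pyRange 0 N 1).map (fun i => (i, (0 : Int))) := by
  have := PySem.Dict.items_foldl_insert_fresh (PySem.List.pyRange 0 N 1)
    (fun i => i) (fun _ => (0 : Int)) PySem.Dict.empty
    (fun a _ => PySem.Dict.contains_empty a) (by simpa using PySem.List.nodup_pyRange_one 0 N)
  simpa using this

theorem init_values (N : Int) :
    ((PySem.List.pyRange 0 N 1).foldl (fun d i => d.insert i (0 : Int))
      PySem.Dict.empty).values = List.replicate N.toNat 0 := by
  show (((PySem.List.pyRange 0 N 1).foldl (fun d i => d.insert i (0 : Int))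
      PySem.Dict.empty).items.map Prod.snd) = _
  rw [init_items, List.map_map]
  have h : (Prod.snd ∘ fun i : Int => (i, (0 : Int))) = fun _ => (0 : Int) := rfl
  rw [h, List.map_const', PySem.List.length_pyRange_one]
  simp

-- ===== VERDICT (by name: the statement is the Claim_ definition above) =====
theorem complete_tasks_spec : Claim_equal_complete_tasks := by
  intro tasks N _hdom hpre
  unfold Spec_complete_tasks complete_tasks complete_tasks_alt
  rcases hpre with rfl | hN
  · have h : PySem.List.sorted ([] : List (String × Int × Int)) (fun x => x.2.2) = [] := rfl
    rw [h]
    cases List.replicate N.toNat (0 : Int) <;> rfl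
  · apply loop_equiv
    · exact PySem.Dict.nodup_keys_foldl_insert _ _ _ PySem.Dict.nodup_keys_empty
    · rw [init_values]
      intro h
      have := congrArg List.length h
      simp only [List.length_replicate, List.length_nil] at this
      omega
    · rw [init_values]
    · exact List.pairwise_replicate.mpr (Or.inr le_rfl)
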